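-- pv_equiv track=rewrite | github.com/Minhdt-ptit25/Training-Iu-Club | IU/IU day 9/3.Mật Mã Thiên Giới Của Thần Số Học.py | len_prime
-- ===== SOURCE A (Python) =====
-- def len_prime(n):
--     str_num = len(str(n))
--     if str_num < 2:
--         return False
--     for i in range(2,int(str_num**0.5)+1):
--         if str_num % i == 0 :
--             return False
--     return True
-- ===== SOURCE B (Python) =====
-- def len_prime(n):
--     d = len(str(n))
--     return d >= 2 and all(d % i for i in range(2, d))
-- ===== Notes on version B (the rewrite author's own statement) =====
-- stated objective: idiomatic
-- what changed: Replaces the sqrt-bounded trial-division loop with early returns by a single boolean expression: a full naive divisor scan over range(2, d) written with all(), removing the sqrt bound and the explicit loop/return structure.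
import Mathlib
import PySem

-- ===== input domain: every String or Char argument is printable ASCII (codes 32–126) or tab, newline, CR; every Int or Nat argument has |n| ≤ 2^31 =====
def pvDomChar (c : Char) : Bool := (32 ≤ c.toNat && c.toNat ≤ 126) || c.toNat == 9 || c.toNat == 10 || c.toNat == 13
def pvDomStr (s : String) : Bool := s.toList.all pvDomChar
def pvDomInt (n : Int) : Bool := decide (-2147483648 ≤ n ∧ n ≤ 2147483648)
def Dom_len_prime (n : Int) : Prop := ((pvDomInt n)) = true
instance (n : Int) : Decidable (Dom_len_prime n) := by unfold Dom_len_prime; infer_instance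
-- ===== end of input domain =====

-- B: same digit-count check, but as a single boolean expression with a full naive
-- divisor scan over range(2, d) (all()) instead of A's sqrt-bounded loop with early returns.

-- ===== PORT A =====
-- the for-loop with an early `return False`
def lenPrimeLoopA (str_num : Int) : List Int → Bool
  | [] => true
  | i :: rest => if PySem.Int.mod str_num i == 0 then false else lenPrimeLoopA str_num rest

-- int(str_num**0.5) is ported as Nat.sqrt: exact here, since str_num = len(str(n)) is a
-- small positive int for which the float computation int(d**0.5) equals the integer sqrt.
def len_prime (n : Int) : Bool :=
  let str_num : Int := PySem.Str.len (PySem.Int.toStr n)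
  if str_num < 2 then false
  else lenPrimeLoopA str_num (PySem.List.pyRange 2 ((Nat.sqrt str_num.toNat : Int) + 1) 1)

-- ===== PORT B =====
def len_prime_alt (n : Int) : Bool :=
  let d : Int := PySem.Str.len (PySem.Int.toStr n)
  decide (d ≥ 2) && (PySem.List.pyRange 2 d 1).all (fun i => !(PySem.Int.mod d i == 0))

-- ===== PRECONDITION & SPEC =====
def Spec_len_prime (n : Int) (out : Bool) : Prop := out = len_prime_alt n
instance (n : Int) (out : Bool) : Decidable (Spec_len_prime n out) := by unfold Spec_len_prime; infer_instance

-- ===== CLAIM (what is proved, stated in full; the proofs are below) =====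
def Claim_equal_len_prime : Prop := ∀ (n : Int), Dom_len_prime n → Spec_len_prime n (len_prime n)

-- ===== LEMMAS AND PROOFS =====

-- ===== VERDICT (by name: the statement is the Claim_ definition above) =====
-- loop A is an all-scan with the negated test
theorem lenPrimeLoopA_eq_all (d : Int) (l : List Int) :
    lenPrimeLoopA d l = l.all (fun i => !(PySem.Int.mod d i == 0)) := by
  induction l with
  | nil => rfl
  | cons i rest ih =>
      simp only [lenPrimeLoopA, List.all_cons]
      split_ifs with h <;> simp [h, ih]

-- for m ≥ 2: no divisor in [2, sqrt m] iff no divisor in [2, m)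
theorem sqrt_scan_eq_full_scan (m : Nat) (hm : 2 ≤ m) :
    (∀ i : Nat, 2 ≤ i → i ≤ Nat.sqrt m → ¬ i ∣ m) ↔ (∀ i : Nat, 2 ≤ i → i < m → ¬ i ∣ m) := by
  constructor
  · intro h
    have hp : m.Prime := Nat.prime_def_le_sqrt.mpr ⟨hm, h⟩
    intro i h2 hi hdvd
    rcases (Nat.Prime.eq_one_or_self_of_dvd hp i hdvd) with h1 | h1 <;> omega
  · intro h i h2 hi
    exact h i h2 (lt_of_le_of_lt hi (Nat.sqrt_lt_self (by omega)))

-- lift an Int-range non-divisor scan to the Nat statement (d ≥ 2, bound B ≥ 0)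
theorem int_scan_iff_nat_scan (d : Int) (hd : 2 ≤ d) (B : Nat) :
    (∀ i : Int, 2 ≤ i → i < (B : Int) → ¬ i ∣ d) ↔ (∀ i : Nat, 2 ≤ i → i < B → ¬ i ∣ d.toNat) := by
  have hto : ((d.toNat : Int)) = d := Int.toNat_of_nonneg (by omega)
  constructor
  · intro h i h2 hi hdvd
    exact h (i : Int) (by exact_mod_cast h2) (by exact_mod_cast hi)
      (by rw [← hto]; exact_mod_cast hdvd)
  · intro h i h2 hi hdvd
    have h0 : (0:Int) ≤ i := by omega
    refine h i.toNat (by omega) (by omega) ?_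
    have : ((i.toNat : Int)) ∣ ((d.toNat : Int)) := by
      rw [Int.toNat_of_nonneg h0, hto]; exact hdvd
    exact_mod_cast this

-- the two Int-range scans agree for d ≥ 2
theorem scans_agree (d : Int) (hd : 2 ≤ d) :
    (PySem.List.pyRange 2 ((Nat.sqrt d.toNat : Int) + 1) 1).all
        (fun i => !(PySem.Int.mod d i == 0))
      = (PySem.List.pyRange 2 d 1).all (fun i => !(PySem.Int.mod d i == 0)) := by
  have hto : ((d.toNat : Int)) = d := Int.toNat_of_nonneg (by omega)
  rw [Bool.eq_iff_iff]
  simp only [List.all_eq_true, PySem.List.mem_pyRange_one, and_imp, Bool.not_eq_true',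
    beq_eq_false_iff_ne, ne_eq, PySem.Int.mod_eq_zero_iff_dvd]
  have h1 : (∀ i : Int, 2 ≤ i → i < (Nat.sqrt d.toNat : Int) + 1 → ¬ i ∣ d)
      ↔ (∀ i : Nat, 2 ≤ i → i < Nat.sqrt d.toNat + 1 → ¬ i ∣ d.toNat) := by
    have := int_scan_iff_nat_scan d hd (Nat.sqrt d.toNat + 1)
    push_cast at this; exact this
  have h2 : (∀ i : Int, 2 ≤ i → i < d → ¬ i ∣ d)
      ↔ (∀ i : Nat, 2 ≤ i → i < d.toNat → ¬ i ∣ d.toNat) := by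
    have := int_scan_iff_nat_scan d hd d.toNat
    rw [hto] at this; exact this
  rw [h1, h2]
  constructor
  · intro h
    exact (sqrt_scan_eq_full_scan d.toNat (by omega)).mp
      (fun i hi hle => h i hi (by omega))
  · intro h i hi hle
    exact (sqrt_scan_eq_full_scan d.toNat (by omega)).mpr h i hi (by omega)

theorem len_prime_spec : Claim_equal_len_prime := by
  intro n _
  show len_prime n = len_prime_alt n
  simp only [len_prime, len_prime_alt]
  by_cases h : PySem.Str.len (PySem.Int.toStr n) < 2
  · rw [if_pos h, decide_eq_false (show ¬ PySem.Str.len (PySem.Int.toStr n) ≥ 2 by omega),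
      Bool.false_and]
  · have h2 : 2 ≤ PySem.Str.len (PySem.Int.toStr n) := by omega
    simp only [if_neg h, lenPrimeLoopA_eq_all, scans_agree _ h2,
      decide_eq_true (show PySem.Str.len (PySem.Int.toStr n) ≥ 2 from h2), Bool.true_and]
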